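-- pv_equiv track=rewrite | github.com/lukegwilkins/Shannon-Capacity-Graphs-Project | GraphScripts/graphProduct.py | verticesInGraphRec
-- ===== SOURCE A (Python) =====
-- def verticesInGraphRec(vertices, power):
-- 	if power <=1:
-- 		returnList=[]
-- 		for v in vertices:
-- 			returnList.append(str(v))
-- 		return returnList
-- 	else:
-- 		subSequence = verticesInGraphRec(vertices, power-1)
-- 		newVertices=[]
-- 		for v in vertices:
-- 			for sequence in subSequence:
-- 				newVertices.append(str(v)+","+sequence)
-- 		return newVertices
-- ===== SOURCE B (Python) =====
-- from itertools import product
--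
-- def verticesInGraphRec(vertices, power):
--     if power <= 1:
--         return [str(v) for v in vertices]
--     return [",".join(str(x) for x in combo)
--             for combo in product(vertices, repeat=power)]
-- ===== Notes on version B (the rewrite author's own statement) =====
-- stated objective: idiomatic
-- what changed: Replaces the hand-written recursion with nested append loops by a single comprehension over itertools.product(vertices, repeat=power), joining each tuple with ','.
import Mathlib
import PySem

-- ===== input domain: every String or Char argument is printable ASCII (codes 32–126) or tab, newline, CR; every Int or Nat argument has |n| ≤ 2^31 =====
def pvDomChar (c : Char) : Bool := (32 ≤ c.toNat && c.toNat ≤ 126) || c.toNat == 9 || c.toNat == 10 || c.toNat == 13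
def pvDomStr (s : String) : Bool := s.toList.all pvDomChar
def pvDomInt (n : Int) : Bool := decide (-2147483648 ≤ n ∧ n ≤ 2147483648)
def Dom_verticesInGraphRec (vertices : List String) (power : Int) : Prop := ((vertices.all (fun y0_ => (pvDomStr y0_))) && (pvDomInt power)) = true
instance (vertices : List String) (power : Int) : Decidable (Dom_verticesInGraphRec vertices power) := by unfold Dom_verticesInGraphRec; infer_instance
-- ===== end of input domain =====

-- B replaces A's recursion with nested append loops by an itertools.product-style
-- Cartesian power joined with "," (objective: idiomatic). Return value only; no mutation.

-- ===== PORT A =====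
-- literal transliteration of A: recursion on power, each append loop becomes a foldl over the same accumulator
def verticesInGraphRec (vertices : List String) (power : Int) : List String :=
  if power ≤ 1 then
    vertices.foldl (fun returnList v => returnList ++ [v]) []
  else
    let subSequence := verticesInGraphRec vertices (power - 1)
    vertices.foldl (fun newVertices v =>
      subSequence.foldl (fun acc sequence => acc ++ [v ++ "," ++ sequence]) newVertices) []
termination_by power.toNat
decreasing_by
  simp only [not_le] at *
  omega

-- ===== PORT B =====
-- itertools.product(vertices, repeat=n): lexicographic, first coordinate slowest (exact)
def pyProdRep (vertices : List String) : Nat → List (List String)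
  | 0 => [[]]
  | n + 1 => vertices.flatMap (fun v => (pyProdRep vertices n).map (fun t => v :: t))

-- ",".join ported by hand; exact for any list of strings
def joinComma : List String → String
  | [] => ""
  | [x] => x
  | x :: y :: xs => x ++ "," ++ joinComma (y :: xs)

def verticesInGraphRec_alt (vertices : List String) (power : Int) : List String :=
  if power ≤ 1 then
    vertices.map (fun v => v)
  else
    (pyProdRep vertices power.toNat).map joinComma

-- ===== PRECONDITION & SPEC =====
-- A recurses once per unit of power, so CPython (default recursion limit 1000) raises
-- RecursionError whenever power >= 999; Pre_ excludes exactly those raising inputs.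
def Pre_verticesInGraphRec (vertices : List String) (power : Int) : Prop := power ≤ 998
instance (vertices : List String) (power : Int) : Decidable (Pre_verticesInGraphRec vertices power) := by unfold Pre_verticesInGraphRec; infer_instance
def pvWitness_verticesInGraphRec : List String × Int := (["a", "b"], 2)

def Spec_verticesInGraphRec (vertices : List String) (power : Int) (out : List String) : Prop := out = verticesInGraphRec_alt vertices power
instance (vertices : List String) (power : Int) (out : List String) : Decidable (Spec_verticesInGraphRec vertices power out) := by unfold Spec_verticesInGraphRec; infer_instance

-- ===== CLAIM (what is proved, stated in full; the proofs are below) =====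
def Claim_equal_verticesInGraphRec : Prop := ∀ (vertices : List String) (power : Int), Dom_verticesInGraphRec vertices power → Pre_verticesInGraphRec vertices power → Spec_verticesInGraphRec vertices power (verticesInGraphRec vertices power)

-- ===== LEMMAS AND PROOFS =====
theorem foldl_append_id (l acc : List String) :
    l.foldl (fun a x => a ++ [x]) acc = acc ++ l := by
  induction l generalizing acc with
  | nil => simp
  | cons x xs ih => simp [List.foldl, ih]

theorem foldl_append_singleton {α β : Type} (f : α → β) (l : List α) (acc : List β) :
    l.foldl (fun a x => a ++ [f x]) acc = acc ++ l.map f := by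
  induction l generalizing acc with
  | nil => simp
  | cons x xs ih => simp [List.foldl, ih]

theorem foldl_append_map {α β : Type} (f : α → List β) (l : List α) (acc : List β) :
    l.foldl (fun a x => a ++ f x) acc = acc ++ l.flatMap f := by
  induction l generalizing acc with
  | nil => simp
  | cons x xs ih => simp [List.foldl, ih]

theorem pyProdRep_ne_nil (vertices : List String) (n : Nat) :
    ∀ t ∈ pyProdRep vertices (n + 1), t ≠ [] := by
  intro t ht
  simp only [pyProdRep, List.mem_flatMap, List.mem_map] at ht
  obtain ⟨v, -, t', -, rfl⟩ := ht
  simp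

theorem joinComma_cons (v : String) (t : List String) (h : t ≠ []) :
    joinComma (v :: t) = v ++ "," ++ joinComma t := by
  cases t with
  | nil => exact absurd rfl h
  | cons y ys => rfl

theorem key (vertices : List String) (n : Nat) :
    verticesInGraphRec vertices ((n : Int) + 1) =
      (pyProdRep vertices (n + 1)).map joinComma := by
  induction n with
  | zero =>
    rw [verticesInGraphRec, if_pos (by norm_num : ((0 : Nat) : Int) + 1 ≤ 1),
      foldl_append_id, List.nil_append]
    simp [pyProdRep, List.map_flatMap, joinComma]
  | succ m ih =>
    rw [verticesInGraphRec]
    have hle : ¬ (((m + 1 : Nat) : Int) + 1 ≤ 1) := by push_cast; omega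
    rw [if_neg hle]
    have hsub : (((m + 1 : Nat) : Int) + 1) - 1 = ((m : Nat) : Int) + 1 := by push_cast; ring
    simp only [hsub, ih]
    simp only [foldl_append_singleton]
    rw [foldl_append_map, List.nil_append]
    have hmem : ∀ v : String,
        ((pyProdRep vertices (m + 1)).map joinComma).map (fun s => v ++ "," ++ s) =
          ((pyProdRep vertices (m + 1)).map (fun t => v :: t)).map joinComma := by
      intro v
      rw [List.map_map, List.map_map]
      apply List.map_congr_left
      intro t ht
      simp [Function.comp, joinComma_cons v t (pyProdRep_ne_nil vertices m t ht)]
    simp only [hmem]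
    conv_rhs => rw [pyProdRep, List.map_flatMap]

-- ===== VERDICT (by name: the statement is the Claim_ definition above) =====
theorem verticesInGraphRec_spec : Claim_equal_verticesInGraphRec := by
  intro vertices power _ _
  unfold Spec_verticesInGraphRec verticesInGraphRec_alt
  by_cases hp : power ≤ 1
  · rw [verticesInGraphRec, if_pos hp, if_pos hp, foldl_append_id, List.nil_append, List.map_id']
  · rw [if_neg hp]
    have ht : power.toNat = (power.toNat - 1) + 1 := by omega
    have hp2 : power = ((power.toNat - 1 : Nat) : Int) + 1 := by omega
    rw [ht, hp2]
    exact key vertices (power.toNat - 1)
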